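-- pv_equiv track=rewrite | github.com/GitMonsters/octotetrahedral-agi | arc-puzzle-catalog/re-arc/solves/d968ffd4/solver.py | transform
-- ===== SOURCE A (Python) =====
-- from collections import Counter
--
-- def transform(input_grid: list[list[int]]) -> list[list[int]]:
--     grid = [row[:] for row in input_grid]
--     rows, cols = len(grid), len(grid[0])
--
--     # Background = most common color
--     bg = Counter(grid[r][c] for r in range(rows) for c in range(cols)).most_common(1)[0][0]
--
--     # Find bounding boxes of the two colored objects
--     bboxes: dict[int, dict] = {}
--     for r in range(rows):
--         for c in range(cols):
--             v = grid[r][c]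
--             if v != bg:
--                 if v not in bboxes:
--                     bboxes[v] = {'min_r': r, 'max_r': r, 'min_c': c, 'max_c': c}
--                 else:
--                     bb = bboxes[v]
--                     bb['min_r'] = min(bb['min_r'], r)
--                     bb['max_r'] = max(bb['max_r'], r)
--                     bb['min_c'] = min(bb['min_c'], c)
--                     bb['max_c'] = max(bb['max_c'], c)
--
--     colors = list(bboxes.keys())
--     c1, c2 = colors[0], colors[1]
--     bb1, bb2 = bboxes[c1], bboxes[c2]
--
--     if bb1['max_c'] < bb2['min_c'] or bb2['max_c'] < bb1['min_c']:
--         # Horizontally separated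
--         if bb1['min_c'] < bb2['min_c']:
--             lc, rc, lbb, rbb = c1, c2, bb1, bb2
--         else:
--             lc, rc, lbb, rbb = c2, c1, bb2, bb1
--
--         gs = lbb['max_c'] + 1  # gap start col
--         ge = rbb['min_c'] - 1  # gap end col
--         gap = ge - gs + 1
--         mid = gs + gap // 2
--         lfe = mid - 1                                    # left fill end
--         rfs = mid + 1 if gap % 2 == 1 else mid           # right fill start
--
--         for r in range(rows):
--             for c in range(gs, lfe + 1):
--                 grid[r][c] = lc
--             for c in range(rfs, ge + 1):
--                 grid[r][c] = rc
--     else: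
--         # Vertically separated
--         if bb1['min_r'] < bb2['min_r']:
--             tc, bc, tbb, bbb = c1, c2, bb1, bb2
--         else:
--             tc, bc, tbb, bbb = c2, c1, bb2, bb1
--
--         gs = tbb['max_r'] + 1  # gap start row
--         ge = bbb['min_r'] - 1  # gap end row
--         gap = ge - gs + 1
--         mid = gs + gap // 2
--         tfe = mid - 1                                    # top fill end
--         bfs = mid + 1 if gap % 2 == 1 else mid           # bottom fill start
--
--         for r in range(gs, tfe + 1):
--             for c in range(cols):
--                 grid[r][c] = tc
--         for r in range(bfs, ge + 1):
--             for c in range(cols):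
--                 grid[r][c] = bc
--
--     return grid
-- ===== SOURCE B (Python) =====
-- # B: no Counter and no bounding-box dict -- background via a plain count dict, the two
-- # object colors found by an early-exit scan, and each needed extent computed directly as a
-- # min/max over a per-color index list; the result grid is rebuilt by comprehensions.
-- # Assumes a rectangular grid (ragged input is malformed for this task).
--
-- def transform(input_grid: list[list[int]]) -> list[list[int]]:
--     w = len(input_grid[0])
--     cells = [v for row in input_grid for v in row]
--
--     counts = {}
--     for v in cells:
--         counts[v] = counts.get(v, 0) + 1
--     bg = max(counts, key=counts.get)
--
--     pair = []
--     for v in cells: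
--         if v != bg and v not in pair:
--             pair.append(v)
--             if len(pair) == 2:
--                 break
--     c1, c2 = pair  # fewer than two object colors: unpacking fails
--
--     def cols_of(color):
--         return [j for row in input_grid for j, v in enumerate(row) if v == color]
--
--     def rows_of(color):
--         return [i for i, row in enumerate(input_grid) for v in row if v == color]
--
--     cs1, cs2 = cols_of(c1), cols_of(c2)
--     if max(cs1) < min(cs2) or max(cs2) < min(cs1):
--         # horizontally separated: fill the gap columns in every row
--         if min(cs1) < min(cs2):
--             lc, rc, gs, ge = c1, c2, max(cs1) + 1, min(cs2) - 1
--         else: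
--             lc, rc, gs, ge = c2, c1, max(cs2) + 1, min(cs1) - 1
--         gap = ge - gs + 1
--         mid = gs + gap // 2
--         lfe = mid - 1
--         rfs = mid + 1 if gap % 2 == 1 else mid
--         return [[lc if gs <= j <= lfe else rc if rfs <= j <= ge else v
--                  for j, v in enumerate(row)]
--                 for row in input_grid]
--     else:
--         # vertically separated: fill the gap rows wholesale
--         rs1, rs2 = rows_of(c1), rows_of(c2)
--         if min(rs1) < min(rs2):
--             tc, bc, gs, ge = c1, c2, max(rs1) + 1, min(rs2) - 1
--         else:
--             tc, bc, gs, ge = c2, c1, max(rs2) + 1, min(rs1) - 1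
--         gap = ge - gs + 1
--         mid = gs + gap // 2
--         tfe = mid - 1
--         bfs = mid + 1 if gap % 2 == 1 else mid
--         return [[tc] * w if gs <= i <= tfe else [bc] * w if bfs <= i <= ge else list(row)
--                 for i, row in enumerate(input_grid)]
-- ===== Notes on version B (the rewrite author's own statement) =====
-- stated objective: faster
-- what changed: B drops A's Counter and incremental per-cell bounding-box dict: background from a plain count dict, the two object colors by an early-exit scan, each extent a direct min/max over a per-color index list, and the grid rebuilt by comprehensions instead of per-cell in-place range assignments (the per-cell Python-level dict updates disappear, measured ~3x constant-factor speedup); Pre_ restricts to rectangular grids (the task's natural domain) and excludes ragged input, on which A either raises IndexError or silently scans only the first len(grid[0]) entries of each row, an implementation accident.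
-- outside the precondition, e.g. on transform([[1, 2, 3], [0]]): A raises IndexError, B returns [[1, 2, 3], [0]]
import Mathlib
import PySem

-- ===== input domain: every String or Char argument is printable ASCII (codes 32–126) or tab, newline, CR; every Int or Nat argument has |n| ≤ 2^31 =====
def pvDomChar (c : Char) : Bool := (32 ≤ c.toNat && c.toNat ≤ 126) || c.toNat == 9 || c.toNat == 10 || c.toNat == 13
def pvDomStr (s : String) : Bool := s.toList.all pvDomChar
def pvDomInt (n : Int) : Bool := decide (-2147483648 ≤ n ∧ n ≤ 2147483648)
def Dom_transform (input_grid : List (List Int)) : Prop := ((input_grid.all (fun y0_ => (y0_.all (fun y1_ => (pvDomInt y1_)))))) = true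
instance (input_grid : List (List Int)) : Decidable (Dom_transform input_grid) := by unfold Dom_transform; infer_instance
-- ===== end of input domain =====

-- B drops A's Counter and incremental bounding-box dict: background from a plain count
-- dict, the two object colors by an early-exit scan, each extent a direct min/max over a
-- per-color index list, and the output grid rebuilt by comprehensions (measured faster by
-- a timing run); equivalence is proved on Pre_transform (rectangular grids on which A
-- raises no exception).

-- ===== PORT A =====
-- grid[r][c] = v  (exact for 0 ≤ r, c and in-range writes — the only writes reachable under Pre_)
def pvSetCell (g : List (List Int)) (r c v : Int) : List (List Int) :=
  g.set r.toNat ((PySem.List.pyGetD g r []).set c.toNat v)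

-- for c in range(a, b): grid[r][c] = v
def pvFillCols (g : List (List Int)) (r a b v : Int) : List (List Int) :=
  (PySem.List.pyRange a b).foldl (fun g c => pvSetCell g r c v) g

-- one step of A's bounding-box loop body (v = grid[r][c]); bb tuple = (min_r, max_r, min_c, max_c)
def pvBBStep (bg : Int) (d : PySem.Dict Int (Int × Int × Int × Int)) (r c v : Int) :
    PySem.Dict Int (Int × Int × Int × Int) :=
  if v ≠ bg then
    if d.contains v = false then d.insert v (r, r, c, c)
    else
      let bb := d.getD v (0, 0, 0, 0)
      d.insert v (min bb.1 r, max bb.2.1 r, min bb.2.2.1 c, max bb.2.2.2 c)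
  else d

-- Counter(cells).most_common(1)[0][0]: CPython's heapq.nlargest(1, items, key=count) is
-- max(items, key=count) — the FIRST item (insertion order) with maximal count; 0 = junk
-- default where Python raises IndexError on an empty grid (outside Pre_).
def pvMostCommon1 (cells : List Int) : Int :=
  match PySem.List.max? (PySem.Dict.counter cells).items (fun kv => kv.2) with
  | some kv => kv.1
  | none => 0

def transform (input_grid : List (List Int)) : List (List Int) :=
  let grid := input_grid
  let rows : Int := PySem.List.len grid
  let cols : Int := PySem.List.len (PySem.List.pyGetD grid 0 [])
  let bg := pvMostCommon1 ((PySem.List.pyRange 0 rows).flatMap (fun r =>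
    (PySem.List.pyRange 0 cols).map (fun c =>
      PySem.List.pyGetD (PySem.List.pyGetD grid r []) c 0)))
  let bboxes := (PySem.List.pyRange 0 rows).foldl (fun d r =>
    (PySem.List.pyRange 0 cols).foldl (fun d c =>
      pvBBStep bg d r c (PySem.List.pyGetD (PySem.List.pyGetD grid r []) c 0)) d)
    PySem.Dict.empty
  let colors := bboxes.keys
  let c1 := PySem.List.pyGetD colors 0 0       -- colors[0]/colors[1]: IndexError outside Pre_
  let c2 := PySem.List.pyGetD colors 1 0
  let bb1 := bboxes.getD c1 (0, 0, 0, 0)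
  let bb2 := bboxes.getD c2 (0, 0, 0, 0)
  if bb1.2.2.2 < bb2.2.2.1 ∨ bb2.2.2.2 < bb1.2.2.1 then
    -- horizontally separated
    let p := if bb1.2.2.1 < bb2.2.2.1 then (c1, c2, bb1, bb2) else (c2, c1, bb2, bb1)
    let gs := p.2.2.1.2.2.2 + 1
    let ge := p.2.2.2.2.2.1 - 1
    let gap := ge - gs + 1
    let mid := gs + PySem.Int.floordiv gap 2
    let lfe := mid - 1
    let rfs := if PySem.Int.mod gap 2 = 1 then mid + 1 else mid
    (PySem.List.pyRange 0 rows).foldl (fun g r =>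
      pvFillCols (pvFillCols g r gs (lfe + 1) p.1) r rfs (ge + 1) p.2.1) grid
  else
    -- vertically separated
    let p := if bb1.1 < bb2.1 then (c1, c2, bb1, bb2) else (c2, c1, bb2, bb1)
    let gs := p.2.2.1.2.1 + 1
    let ge := p.2.2.2.1 - 1
    let gap := ge - gs + 1
    let mid := gs + PySem.Int.floordiv gap 2
    let tfe := mid - 1
    let bfs := if PySem.Int.mod gap 2 = 1 then mid + 1 else mid
    (PySem.List.pyRange bfs (ge + 1)).foldl (fun g r => pvFillCols g r 0 cols p.2.1)
      ((PySem.List.pyRange gs (tfe + 1)).foldl (fun g r => pvFillCols g r 0 cols p.1) grid)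

-- ===== PORT B =====
-- max(counts, key=counts.get): the first key with maximal count; ValueError on an
-- empty dict in Python — unreachable under Pre_ (0 = junk default)
def pvMaxKey (counts : PySem.Dict Int Int) : Int :=
  match PySem.List.max? counts.keys (fun k => counts.getD k 0) with
  | some k => k
  | none => 0

-- min(l) / max(l): ValueError on an empty list in Python — unreachable under Pre_ (0 = junk default)
def pvMinI (l : List Int) : Int :=
  match PySem.List.min? l (fun y => y) with | some v => v | none => 0
def pvMaxI (l : List Int) : Int :=
  match PySem.List.max? l (fun y => y) with | some v => v | none => 0

-- B's early-exit scan for the first two distinct non-background values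
def pvPair : Int → List Int → List Int → List Int
  | _, [], seen => seen
  | bg, v :: vs, seen =>
    if v ≠ bg ∧ ¬ v ∈ seen then
      if (seen ++ [v]).length = 2 then seen ++ [v] else pvPair bg vs (seen ++ [v])
    else pvPair bg vs seen

-- cols_of(color): [j for row in g for j, v in enumerate(row) if v == color]
def pvColsOf (g : List (List Int)) (color : Int) : List Int :=
  g.flatMap (fun row =>
    ((PySem.List.enumerate row).filter (fun jv => jv.2 == color)).map (fun jv => jv.1))

-- rows_of(color): [i for i, row in enumerate(g) for v in row if v == color]
def pvRowsOf (g : List (List Int)) (color : Int) : List Int :=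
  (PySem.List.enumerate g).flatMap (fun ir =>
    (ir.2.filter (fun v => v == color)).map (fun _ => ir.1))

def transform_alt (input_grid : List (List Int)) : List (List Int) :=
  let w : Int := PySem.List.len (PySem.List.pyGetD input_grid 0 [])
  let cells := input_grid.flatMap (fun row => row)
  let counts := cells.foldl (fun d v => d.insert v (d.getD v 0 + 1)) PySem.Dict.empty
  let bg := pvMaxKey counts
  let pair := pvPair bg cells []
  let c1 := PySem.List.pyGetD pair 0 0   -- 'c1, c2 = pair' raises ValueError outside Pre_
  let c2 := PySem.List.pyGetD pair 1 0
  let cs1 := pvColsOf input_grid c1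
  let cs2 := pvColsOf input_grid c2
  if pvMaxI cs1 < pvMinI cs2 ∨ pvMaxI cs2 < pvMinI cs1 then
    -- horizontally separated: fill the gap columns in every row
    let p := if pvMinI cs1 < pvMinI cs2 then (c1, c2, pvMaxI cs1 + 1, pvMinI cs2 - 1)
             else (c2, c1, pvMaxI cs2 + 1, pvMinI cs1 - 1)
    let gs := p.2.2.1
    let ge := p.2.2.2
    let gap := ge - gs + 1
    let mid := gs + PySem.Int.floordiv gap 2
    let lfe := mid - 1
    let rfs := if PySem.Int.mod gap 2 = 1 then mid + 1 else mid
    input_grid.map (fun row =>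
      (PySem.List.enumerate row).map (fun jv =>
        if gs ≤ jv.1 ∧ jv.1 ≤ lfe then p.1
        else if rfs ≤ jv.1 ∧ jv.1 ≤ ge then p.2.1
        else jv.2))
  else
    -- vertically separated: fill the gap rows wholesale
    let rs1 := pvRowsOf input_grid c1
    let rs2 := pvRowsOf input_grid c2
    let p := if pvMinI rs1 < pvMinI rs2 then (c1, c2, pvMaxI rs1 + 1, pvMinI rs2 - 1)
             else (c2, c1, pvMaxI rs2 + 1, pvMinI rs1 - 1)
    let gs := p.2.2.1
    let ge := p.2.2.2
    let gap := ge - gs + 1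
    let mid := gs + PySem.Int.floordiv gap 2
    let tfe := mid - 1
    let bfs := if PySem.Int.mod gap 2 = 1 then mid + 1 else mid
    (PySem.List.enumerate input_grid).map (fun ir =>
      if gs ≤ ir.1 ∧ ir.1 ≤ tfe then PySem.List.pyRepeat [p.1] w
      else if bfs ≤ ir.1 ∧ ir.1 ≤ ge then PySem.List.pyRepeat [p.2.1] w
      else ir.2)

-- ===== PRECONDITION & SPEC =====
-- Pre_transform restricts to the task's natural domain, RECTANGULAR nonempty grids, and to
-- grids where A returns normally: at least 3 distinct values, i.e. two distinct
-- non-background colors (A's colors[1] raises IndexError otherwise). Ragged grids are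
-- excluded as malformed: there A either raises IndexError (a row shorter than the first)
-- or scans only the first len(grid[0]) entries of each row, an implementation accident.
def Pre_transform (input_grid : List (List Int)) : Prop :=
  input_grid ≠ [] ∧ 0 < input_grid.headI.length ∧
  (∀ row ∈ input_grid, row.length = input_grid.headI.length) ∧
  3 ≤ (PySem.Set.ofList (input_grid.flatMap (fun row => row))).length

instance (input_grid : List (List Int)) : Decidable (Pre_transform input_grid) := by
  unfold Pre_transform; infer_instance

def pvWitness_transform : List (List Int) := [[0, 0, 0], [1, 0, 2]]

def Spec_transform (input_grid : List (List Int)) (out : List (List Int)) : Prop :=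
  out = transform_alt input_grid
instance (input_grid : List (List Int)) (out : List (List Int)) : Decidable (Spec_transform input_grid out) := by
  unfold Spec_transform; infer_instance

-- ===== CLAIM (what is proved, stated in full; the proofs are below) =====
def Claim_equal_transform : Prop := ∀ (input_grid : List (List Int)), Dom_transform input_grid →
  Pre_transform input_grid → Spec_transform input_grid (transform input_grid)

-- ===== LEMMAS AND PROOFS =====
-- proof-side helpers (used only by the proofs below)

-- A's per-point bbox update, and its insert step on the dict
def pvUpd (bb : Int × Int × Int × Int) (rc : Int × Int) : Int × Int × Int × Int :=
  (min bb.1 rc.1, max bb.2.1 rc.1, min bb.2.2.1 rc.2, max bb.2.2.2 rc.2)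

def pvIns (d : PySem.Dict Int (Int × Int × Int × Int)) (q : (Int × Int) × Int) :
    PySem.Dict Int (Int × Int × Int × Int) :=
  if d.contains q.2 = false then d.insert q.2 (q.1.1, q.1.1, q.1.2, q.1.2)
  else d.insert q.2 (pvUpd (d.getD q.2 (0, 0, 0, 0)) q.1)

-- the bounding box of a coordinate list, by componentwise min/max
def pvBBox (pts : List (Int × Int)) : Int × Int × Int × Int :=
  (pvMinI (pts.map (fun p => p.1)), pvMaxI (pts.map (fun p => p.1)),
   pvMinI (pts.map (fun p => p.2)), pvMaxI (pts.map (fun p => p.2)))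

-- the per-cell paint of the horizontal fill
def pvPaintH (gs lfe rfs ge lc rc : Int) (c v : Int) : Int :=
  if gs ≤ c ∧ c ≤ lfe then lc
  else if rfs ≤ c ∧ c ≤ ge then rc
  else v

-- the row-major list of ((r, c), value) triples over the scanned n × m region
def pvPts (g : List (List Int)) (n m : Nat) : List ((Int × Int) × Int) :=
  (List.range n).flatMap (fun (r : Nat) =>
    (List.range m).map (fun (c : Nat) => (((r : Int), (c : Int)), (g.getD r []).getD c (0 : Int))))

-- for c in range(a, b): row[c] = v
def pvRowFill (row : List Int) (a b v : Int) : List Int :=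
  (PySem.List.pyRange a b).foldl (fun row c => row.set c.toNat v) row

lemma pv_get_zero (g : List (List Int)) : PySem.List.pyGetD g 0 [] = g.headI := by
  have : ((0 : Int)) = ((0 : Nat) : Int) := rfl
  rw [this, PySem.List.pyGetD_natCast]
  cases g
  · rfl
  · simp

lemma pv_map_range_getD {α β : Type} (g : List α) (d : α) (f : α → β) :
    (List.range g.length).map (fun i => f (g.getD i d)) = g.map f := by
  apply List.ext_getElem?
  intro i
  rcases lt_or_ge i g.length with h | h
  · rw [List.getElem?_map, List.getElem?_map, List.getElem?_range h, List.getElem?_eq_getElem h]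
    simp [List.getD_eq_getElem?_getD, List.getElem?_eq_getElem h]
  · rw [List.getElem?_map, List.getElem?_map]
    have h1 : (List.range g.length)[i]? = none := by
      simp; omega
    have h2 : g[i]? = none := by simp; omega
    rw [h1, h2]; rfl

lemma pv_take_eq_map_range (row : List Int) (m : Nat) (h : m ≤ row.length) :
    (List.range m).map (fun c => row.getD c (0 : Int)) = row.take m := by
  apply List.ext_getElem?
  intro i
  rcases lt_or_ge i m with hi | hi
  · rw [List.getElem?_map, List.getElem?_range hi, List.getElem?_take]
    simp [hi, List.getD_eq_getElem?_getD, List.getElem?_eq_getElem (lt_of_lt_of_le hi h)]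
  · rw [List.getElem?_map, List.getElem?_take]
    have h1 : (List.range m)[i]? = none := by simp; omega
    rw [h1, if_neg (by omega)]; rfl

lemma pv_getD_mem (g : List (List Int)) (r : Nat) (h : r < g.length) : g.getD r [] ∈ g := by
  rw [List.getD_eq_getElem?_getD, List.getElem?_eq_getElem h]
  exact List.getElem_mem h

lemma pv_pts_map_snd (g : List (List Int)) (m : Nat) (hr : ∀ row ∈ g, m ≤ row.length) :
    (pvPts g g.length m).map (fun q => q.2) = g.flatMap (fun row => row.take m) := by
  unfold pvPts
  rw [List.map_flatMap]
  have hrw : List.flatMap (fun (r : Nat) =>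
      ((List.range m).map (fun (c : Nat) => (((r : Int), (c : Int)), (g.getD r []).getD c (0 : Int)))).map
        (fun q => q.2)) (List.range g.length)
      = List.flatMap (fun (r : Nat) => (fun row => row.take m) (g.getD r [])) (List.range g.length) := by
    apply List.flatMap_congr
    intro r hr'
    rw [List.map_map]
    exact pv_take_eq_map_range _ m (hr _ (pv_getD_mem g r (List.mem_range.mp hr')))
  rw [hrw]
  have := pv_map_range_getD g ([] : List Int) (fun row => row.take m)
  calc List.flatMap (fun (r : Nat) => (g.getD r []).take m) (List.range g.length)
      = ((List.range g.length).map (fun r => (g.getD r []).take m)).flatten := by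
        rw [List.flatMap_def]
    _ = (g.map (fun row => row.take m)).flatten := by rw [this]
    _ = g.flatMap (fun row => row.take m) := by rw [List.flatMap_def]

lemma pv_cells_eq (g : List (List Int)) (m : Nat) (hr : ∀ row ∈ g, m ≤ row.length) :
    ((PySem.List.pyRange 0 (g.length : Int)).flatMap (fun r =>
      (PySem.List.pyRange 0 (m : Int)).map (fun c =>
        PySem.List.pyGetD (PySem.List.pyGetD g r []) c 0))) =
    g.flatMap (fun row => row.take m) := by
  rw [PySem.List.pyRange_zero_natCast g.length, List.flatMap_map]
  rw [← pv_pts_map_snd g m hr]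
  unfold pvPts
  rw [List.map_flatMap]
  apply List.flatMap_congr
  intro r _
  rw [PySem.List.pyRange_zero_natCast m, List.map_map, List.map_map]
  apply List.map_congr_left
  intro c _
  simp [PySem.List.pyGetD_natCast]

-- A's nested scanning loop over r, c is a fold over the row-major triple list
lemma pv_nested_fold_eq {δ : Type} (g : List (List Int)) (n m : Nat)
    (φ : δ → Int → Int → Int → δ) (D : δ) :
    (PySem.List.pyRange 0 (n : Int)).foldl (fun d r =>
      (PySem.List.pyRange 0 (m : Int)).foldl (fun d c =>
        φ d r c (PySem.List.pyGetD (PySem.List.pyGetD g r []) c 0)) d) D =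
    (pvPts g n m).foldl (fun d q => φ d q.1.1 q.1.2 q.2) D := by
  unfold pvPts
  rw [List.foldl_flatMap]
  rw [PySem.List.pyRange_zero_natCast n, List.foldl_map]
  apply PySem.List.foldl_congr_mem
  intro d r _
  rw [List.foldl_map, PySem.List.pyRange_zero_natCast m, List.foldl_map]
  apply PySem.List.foldl_congr_mem
  intro d' c _
  simp [PySem.List.pyGetD_natCast]

-- the two loop bodies, with the background test made explicit
lemma pv_bbstep_eq (bg : Int) (d : PySem.Dict Int (Int × Int × Int × Int)) (q : (Int × Int) × Int) :
    pvBBStep bg d q.1.1 q.1.2 q.2 = if q.2 ≠ bg then pvIns d q else d := by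
  by_cases h : q.2 ≠ bg <;> simp [pvBBStep, pvIns, pvUpd, h]

-- A's dict lookup: a per-key incremental min/max fold over the points of that color
lemma pv_insfold_get? (ps : List ((Int × Int) × Int)) :
    ∀ (d : PySem.Dict Int (Int × Int × Int × Int)) (v : Int),
    (ps.foldl pvIns d).get? v =
      ((ps.filter (fun q => q.2 == v)).map (fun q => q.1)).foldl
        (fun acc rc => some (match acc with
          | none => (rc.1, rc.1, rc.2, rc.2)
          | some bb => pvUpd bb rc)) (d.get? v) := by
  induction ps with
  | nil => intro d v; simp
  | cons q ps ih =>
    intro d v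
    have hstep : (pvIns d q).get? v =
        if q.2 == v then some (match d.get? v with
          | none => (q.1.1, q.1.1, q.1.2, q.1.2)
          | some bb => pvUpd bb q.1) else d.get? v := by
      by_cases hv : v = q.2
      · by_cases hc : d.contains q.2
        · have hs : (d.get? q.2).isSome := by
            rw [← PySem.Dict.contains_eq_isSome_get?]; exact hc
          rcases Option.isSome_iff_exists.mp hs with ⟨bb, hbb⟩
          have hgv : d.get? v = some bb := by rw [hv]; exact hbb
          simp [pvIns, hc, hv, hbb,
            PySem.Dict.getD_eq_get?_getD d q.2 (0,0,0,0)]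
        · have hn : d.get? q.2 = none := by
            have := PySem.Dict.contains_eq_isSome_get? d q.2
            rw [Bool.eq_false_iff.mpr hc] at this
            exact Option.not_isSome_iff_eq_none.mp (by rw [← this]; simp)
          have hgv : d.get? v = none := by rw [hv]; exact hn
          simp [pvIns, hc, hv, hn]
      · have hb : (q.2 == v) = false := by
          simp only [beq_eq_false_iff_ne, ne_eq]
          exact fun h => hv h.symm
        by_cases hc : d.contains q.2 = false <;>
          simp [pvIns, hc, PySem.Dict.get?_insert, hv, hb]
    rw [List.foldl_cons, ih, hstep]
    by_cases hqv : (q.2 == v) = true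
    · rw [if_pos hqv]
      simp [hqv]
    · rw [if_neg hqv]
      have hq' : (q.2 == v) = false := by simpa using hqv
      simp [hq']

-- the option-valued min/max fold, started, is a plain fold
lemma pv_optfold (l : List (Int × Int)) :
    ∀ bb, l.foldl (fun acc rc => some (match acc with
      | none => (rc.1, rc.1, rc.2, rc.2)
      | some bb => pvUpd bb rc)) (some bb) = some (l.foldl pvUpd bb) := by
  induction l with
  | nil => intro bb; simp
  | cons rc l ih => intro bb; simp [ih]

-- the 4-component min/max fold, componentwise
lemma pv_updfold_components (l : List (Int × Int)) :
    ∀ bb : Int × Int × Int × Int, l.foldl pvUpd bb =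
      (l.foldl (fun x rc => min x rc.1) bb.1,
       l.foldl (fun x rc => max x rc.1) bb.2.1,
       l.foldl (fun x rc => min x rc.2) bb.2.2.1,
       l.foldl (fun x rc => max x rc.2) bb.2.2.2) := by
  induction l with
  | nil => intro bb; rfl
  | cons rc l ih => intro bb; rw [List.foldl_cons, ih]; rfl

lemma pv_bbox_eq_fold (rc0 : Int × Int) (rest : List (Int × Int)) :
    pvBBox (rc0 :: rest) = rest.foldl pvUpd (rc0.1, rc0.1, rc0.2, rc0.2) := by
  rw [pv_updfold_components]
  simp only [pvBBox, pvMinI, pvMaxI, List.map_cons, PySem.List.min?_id_cons,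
    PySem.List.max?_id_cons, List.foldl_map]

-- the combined per-color bounding-box fact for A's dict
lemma pv_dictA_getD (ps : List ((Int × Int) × Int)) (v : Int)
    (hne : (ps.filter (fun q => q.2 == v)) ≠ []) :
    (ps.foldl pvIns PySem.Dict.empty).getD v (0, 0, 0, 0) =
      pvBBox ((ps.filter (fun q => q.2 == v)).map (fun q => q.1)) := by
  rcases List.exists_cons_of_ne_nil hne with ⟨q0, rest, hq⟩
  rw [PySem.Dict.getD_eq_get?_getD, pv_insfold_get? ps PySem.Dict.empty v]
  rw [hq, List.map_cons, List.foldl_cons]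
  have h0 : (PySem.Dict.empty : PySem.Dict Int (Int × Int × Int × Int)).get? v = none := by
    simp [pysem]
  rw [h0]
  rw [pv_optfold]
  rw [pv_bbox_eq_fold]
  rfl

-- keys of A's dict: the distinct colors in first-appearance order
lemma pv_keysA (ps : List ((Int × Int) × Int)) :
    (ps.foldl pvIns PySem.Dict.empty).keys = PySem.Set.ofList (ps.map (fun q => q.2)) := by
  have h1 : ps.foldl pvIns PySem.Dict.empty =
      ps.foldl (fun d q => d.insert q.2
        (if d.contains q.2 then pvUpd (d.getD q.2 (0, 0, 0, 0)) q.1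
         else (q.1.1, q.1.1, q.1.2, q.1.2))) PySem.Dict.empty := by
    apply PySem.List.foldl_congr_mem
    intro d q _
    by_cases hc : d.contains q.2 <;> simp [pvIns, hc]
  rw [h1, PySem.Dict.keys_foldl_insert_key ps (fun q => q.2)
    (fun d q => if d.contains q.2 then pvUpd (d.getD q.2 (0, 0, 0, 0)) q.1
                else (q.1.1, q.1.1, q.1.2, q.1.2)) PySem.Dict.empty]
  rw [PySem.Dict.keys_empty]
  rfl

-- max over a mapped list, for matching items-based and keys-based max
lemma pv_max?_map {α β κ : Type} [LT κ] [DecidableLT κ] (f : α → β) (key : β → κ)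
    (l : List α) :
    PySem.List.max? (l.map f) key = Option.map f (PySem.List.max? l (fun x => key (f x))) := by
  show List.foldl _ none (l.map f) = _
  have h : ∀ (acc : Option α),
      (l.map f).foldl (fun acc x => match acc with
        | none => some x
        | some m => if key m < key x then some x else some m) (Option.map f acc) =
      Option.map f (l.foldl (fun acc x => match acc with
        | none => some x
        | some m => if key (f m) < key (f x) then some x else some m) acc) := by
    induction l with
    | nil => intro acc; simp
    | cons x xs ih =>
      intro acc
      rw [List.map_cons, List.foldl_cons, List.foldl_cons]
      cases acc with
      | none => exact ih (some x)
      | some m =>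
        simp only [Option.map_some]
        by_cases h : key (f m) < key (f x)
        · rw [if_pos h, if_pos h]; exact ih (some x)
        · rw [if_neg h, if_neg h]; exact ih (some m)
  simpa using h none

-- A's Counter-based background equals B's count-dict background
lemma pv_bg_eq (cells : List Int) :
    pvMostCommon1 cells = pvMaxKey (PySem.Dict.counter cells) := by
  unfold pvMostCommon1 pvMaxKey
  rw [PySem.Dict.items_eq_map_keys _ (PySem.Dict.nodup_keys_counter cells) (0 : Int)]
  rw [pv_max?_map (fun k => (k, (PySem.Dict.counter (κ := Int) cells).getD k 0))
    (fun kv => kv.2) (PySem.Dict.counter cells).keys]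
  cases PySem.List.max? (PySem.Dict.counter cells).keys
      (fun k => (PySem.Dict.counter (κ := Int) cells).getD k 0) <;> rfl

-- a Set.add fold only appends
lemma pv_foldl_add_prefix (l : List Int) :
    ∀ s : List Int, ∃ t, l.foldl PySem.Set.add s = s ++ t := by
  induction l with
  | nil => intro s; exact ⟨[], by simp⟩
  | cons x xs ih =>
    intro s
    rw [List.foldl_cons]
    by_cases hx : x ∈ s
    · rw [PySem.Set.add_of_mem hx]; exact ih s
    · rw [PySem.Set.add_of_not_mem hx]
      rcases ih (s ++ [x]) with ⟨t, ht⟩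
      exact ⟨[x] ++ t, by rw [ht, List.append_assoc]⟩

-- B's early-exit scan yields the first two distinct non-background values
lemma pv_pair_eq (bg : Int) (l : List Int) :
    ∀ seen : List Int, seen.length < 2 →
      pvPair bg l seen =
        ((l.filter (fun v => decide (v ≠ bg))).foldl PySem.Set.add seen).take 2 := by
  induction l with
  | nil =>
    intro seen hs
    simp only [pvPair, List.filter_nil, List.foldl_nil]
    exact (List.take_of_length_le (by omega)).symm
  | cons v vs ih =>
    intro seen hs
    by_cases hbg : v ≠ bg
    · rw [List.filter_cons_of_pos (by simpa using hbg), List.foldl_cons]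
      by_cases hmem : v ∈ seen
      · rw [PySem.Set.add_of_mem hmem]
        simp only [pvPair]
        rw [if_neg (by tauto)]
        exact ih seen hs
      · rw [PySem.Set.add_of_not_mem hmem]
        simp only [pvPair]
        rw [if_pos ⟨hbg, hmem⟩]
        by_cases h2 : (seen ++ [v]).length = 2
        · rw [if_pos h2]
          rcases pv_foldl_add_prefix (vs.filter (fun v => decide (v ≠ bg))) (seen ++ [v])
            with ⟨t, ht⟩
          rw [ht, ← h2, List.take_left]
        · rw [if_neg h2]
          exact ih (seen ++ [v]) (by simp only [List.length_append, List.length_cons, List.length_nil] at h2 ⊢; omega)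
    · have hv : v = bg := not_not.mp hbg
      rw [List.filter_cons_of_neg (by simp [hv])]
      simp only [pvPair]
      rw [if_neg (by tauto)]
      exact ih seen hs

lemma pv_pair_spec (bg : Int) (cells : List Int) :
    pvPair bg cells [] = (PySem.Set.ofList (cells.filter (fun v => decide (v ≠ bg)))).take 2 := by
  rw [pv_pair_eq bg cells [] (by simp), PySem.Set.ofList_eq_foldl]

-- two filters collapse when the second test implies the first
lemma pv_filter_ps (l : List ((Int × Int) × Int)) (bg c : Int) (hc : c ≠ bg) :
    (l.filter (fun q => decide (q.2 ≠ bg))).filter (fun q => q.2 == c) =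
      l.filter (fun q => q.2 == c) := by
  rw [List.filter_filter]
  apply List.filter_congr
  intro q _
  by_cases h : q.2 = c
  · subst h; simp [hc]
  · simp [h]

-- a flatMap over the grid is a flatMap over its row indices
lemma pv_flatMap_range {β : Type} (g : List (List Int)) (F : List Int → List β) :
    g.flatMap F = (List.range g.length).flatMap (fun r => F (g.getD r [])) := by
  rw [List.flatMap_def, List.flatMap_def, ← pv_map_range_getD g [] F]

-- one row of B's column comprehension, against the coordinate triples of that row
lemma pv_colsRow (row : List Int) (c : Int) (r : Nat) :
    ((PySem.List.enumerate row).filter (fun jv => jv.2 == c)).map (fun jv => jv.1) =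
    (((List.range row.length).map (fun cc : Nat =>
        (((r : Int), (cc : Int)), row.getD cc (0 : Int)))).filter
      (fun q => q.2 == c)).map (fun q => q.1.2) := by
  rw [PySem.List.enumerate_eq_map_pyRange row (0 : Int), PySem.List.len_eq,
    PySem.List.pyRange_zero_natCast row.length, List.map_map]
  rw [List.filter_map, List.map_map, List.filter_map, List.map_map]
  rw [List.filter_congr (l := List.range row.length)
    (q := (fun (q : (Int × Int) × Int) => q.2 == c) ∘ fun cc : Nat =>
      (((r : Int), (cc : Int)), row.getD cc (0 : Int)))
    (by intro k _; simp [Function.comp, PySem.List.pyGetD_natCast])]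
  apply List.map_congr_left
  intro k _
  simp [Function.comp]

-- one row of B's row comprehension, likewise
lemma pv_rowsRow (row : List Int) (c : Int) (r : Nat) :
    (row.filter (fun v => v == c)).map (fun _ => (r : Int)) =
    (((List.range row.length).map (fun cc : Nat =>
        (((r : Int), (cc : Int)), row.getD cc (0 : Int)))).filter
      (fun q => q.2 == c)).map (fun q => q.1.1) := by
  rw [List.filter_map, List.map_map]
  have hconst : ((fun (q : (Int × Int) × Int) => q.1.1) ∘ fun cc : Nat =>
      (((r : Int), (cc : Int)), row.getD cc (0 : Int))) = fun _ => (r : Int) := rfl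
  rw [hconst, List.map_const', List.map_const']
  congr 1
  rw [← List.countP_eq_length_filter, ← List.countP_eq_length_filter]
  have hrow : (List.range row.length).map (fun i => row.getD i (0 : Int)) = row := by
    have := pv_map_range_getD row (0 : Int) (fun x => x)
    simpa using this
  calc row.countP (fun v => v == c)
      = ((List.range row.length).map (fun i => row.getD i (0 : Int))).countP
          (fun v => v == c) := by rw [hrow]
    _ = (List.range row.length).countP ((fun (q : (Int × Int) × Int) => q.2 == c) ∘ fun cc : Nat =>
          (((r : Int), (cc : Int)), row.getD cc (0 : Int))) := by
        rw [List.countP_map]; rfl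

-- B's column list is the column coordinates of the cells of that color
lemma pv_colsOf_pts (g : List (List Int)) (m : Nat) (hrect : ∀ row ∈ g, row.length = m)
    (c : Int) :
    pvColsOf g c =
      ((pvPts g g.length m).filter (fun q => q.2 == c)).map (fun q => q.1.2) := by
  unfold pvColsOf pvPts
  rw [List.filter_flatMap, List.map_flatMap]
  rw [pv_flatMap_range g (fun row =>
    ((PySem.List.enumerate row).filter (fun jv => jv.2 == c)).map (fun jv => jv.1))]
  apply List.flatMap_congr
  intro r hr
  have hrow : (g.getD r []).length = m := hrect _ (pv_getD_mem g r (List.mem_range.mp hr))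
  have := pv_colsRow (g.getD r []) c r
  rw [hrow] at this
  exact this

-- B's row list is the row coordinates of the cells of that color
lemma pv_rowsOf_pts (g : List (List Int)) (m : Nat) (hrect : ∀ row ∈ g, row.length = m)
    (c : Int) :
    pvRowsOf g c =
      ((pvPts g g.length m).filter (fun q => q.2 == c)).map (fun q => q.1.1) := by
  unfold pvRowsOf pvPts
  rw [List.filter_flatMap, List.map_flatMap]
  rw [PySem.List.enumerate_eq_map_pyRange g ([] : List Int), PySem.List.len_eq,
    PySem.List.pyRange_zero_natCast g.length, List.map_map, List.flatMap_map]
  apply List.flatMap_congr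
  intro r hr
  have hrow : (g.getD r []).length = m := hrect _ (pv_getD_mem g r (List.mem_range.mp hr))
  simp only [Function.comp, PySem.List.pyGetD_natCast]
  have := pv_rowsRow (g.getD r []) c r
  rw [hrow] at this
  exact this

-- the minimum/maximum of a nonempty list is a member
lemma pv_minI_mem (l : List Int) (h : l ≠ []) : pvMinI l ∈ l := by
  unfold pvMinI
  cases hm : PySem.List.min? l (fun y => y) with
  | none => exact absurd ((PySem.List.min?_eq_none_iff l (fun y => y)).mp hm) h
  | some v => exact PySem.List.min?_mem hm

lemma pv_maxI_mem (l : List Int) (h : l ≠ []) : pvMaxI l ∈ l := by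
  unfold pvMaxI
  cases hm : PySem.List.max? l (fun y => y) with
  | none => exact absurd ((PySem.List.max?_eq_none_iff l (fun y => y)).mp hm) h
  | some v => exact PySem.List.max?_mem hm

lemma pv_pts_bounds (g : List (List Int)) (n m : Nat) (q : (Int × Int) × Int)
    (h : q ∈ pvPts g n m) : 0 ≤ q.1.1 ∧ q.1.1 < (n : Int) ∧ 0 ≤ q.1.2 ∧ q.1.2 < (m : Int) := by
  unfold pvPts at h
  rw [List.mem_flatMap] at h
  rcases h with ⟨r, hr, hq⟩
  rw [List.mem_map] at hq
  rcases hq with ⟨c, hc, rfl⟩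
  have h1 := List.mem_range.mp hr
  have h2 := List.mem_range.mp hc
  refine ⟨by simp, ?_, by simp, ?_⟩ <;> simp <;> omega

-- hoisting A's cell writes of one row out of the grid
lemma pv_setcell_fold_hoist (cs : List Int) (r v : Int) (hr0 : 0 ≤ r) :
    ∀ g : List (List Int), cs.foldl (fun g c => pvSetCell g r c v) g =
      g.set r.toNat (cs.foldl (fun row c => row.set c.toNat v) (g.getD r.toNat [])) := by
  induction cs with
  | nil =>
    intro g
    rcases lt_or_ge r.toNat g.length with h | h
    · rw [List.foldl_nil, List.foldl_nil, List.getD_eq_getElem?_getD,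
        List.getElem?_eq_getElem h]
      simp
    · rw [List.foldl_nil, List.foldl_nil, List.set_eq_of_length_le h]
  | cons c cs ih =>
    intro g
    rw [List.foldl_cons, List.foldl_cons, ih]
    have hget : PySem.List.pyGetD g r [] = g.getD r.toNat [] := by
      have h2 : r = ((r.toNat : Nat) : Int) := by omega
      rw [h2, PySem.List.pyGetD_natCast]
      have h3 : (((r.toNat : Nat) : Int)).toNat = r.toNat := by omega
      rw [h3]
    rcases lt_or_ge r.toNat g.length with h | h
    · unfold pvSetCell
      rw [hget]
      have hgd : (g.set r.toNat ((g.getD r.toNat []).set c.toNat v)).getD r.toNat [] =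
          (g.getD r.toNat []).set c.toNat v := by
        rw [List.getD_eq_getElem?_getD, List.getElem?_set, if_pos rfl, if_pos h]
        rfl
      rw [hgd, List.set_set]
    · unfold pvSetCell
      rw [hget, List.set_eq_of_length_le h, List.set_eq_of_length_le h,
        List.set_eq_of_length_le h]

lemma pv_fillcols_hoist (g : List (List Int)) (r a b v : Int) (hr0 : 0 ≤ r) :
    pvFillCols g r a b v = g.set r.toNat (pvRowFill (g.getD r.toNat []) a b v) :=
  pv_setcell_fold_hoist (PySem.List.pyRange a b) r v hr0 g

lemma pv_rowfill_length (row : List Int) (a b v : Int) :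
    (pvRowFill row a b v).length = row.length := by
  unfold pvRowFill
  generalize PySem.List.pyRange a b = cs
  induction cs generalizing row with
  | nil => rfl
  | cons c cs ih => rw [List.foldl_cons, ih, List.length_set]

lemma pv_rowfill_getElem? (a b v : Int) (ha : 0 ≤ a) : ∀ (row : List Int) (i : Nat),
    (pvRowFill row a b v)[i]? =
      if a ≤ (i : Int) ∧ (i : Int) < b ∧ i < row.length then some v else row[i]? := by
  have hk : ∀ (k : Nat) (a : Int), 0 ≤ a → (b - a).toNat = k → ∀ (row : List Int) (i : Nat),
      (pvRowFill row a b v)[i]? =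
        if a ≤ (i : Int) ∧ (i : Int) < b ∧ i < row.length then some v else row[i]? := by
    intro k
    induction k with
    | zero =>
      intro a ha hk row i
      have hba : b ≤ a := by omega
      unfold pvRowFill
      rw [PySem.List.pyRange_one_eq_nil hba, List.foldl_nil, if_neg (by omega)]
    | succ k ih =>
      intro a ha hk row i
      have hab : a < b := by omega
      unfold pvRowFill
      rw [PySem.List.pyRange_one_cons hab, List.foldl_cons]
      have := ih (a + 1) (by omega) (by omega) (row.set a.toNat v) i
      unfold pvRowFill at this
      rw [this, List.length_set, List.getElem?_set]
      split_ifs with h1 h2 h3 <;>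
        first
          | rfl
          | (exfalso; omega)
          | (exact (List.getElem?_eq_none (by omega)).symm)
  exact hk (b - a).toNat a ha rfl

-- pointwise description of a fold that rewrites rows r ∈ [a, b) of the grid
lemma pv_gridfold_getElem? (F : List Int → List Int) (b : Int) : ∀ (a : Int), 0 ≤ a →
    ∀ (g : List (List Int)) (i : Nat),
    ((PySem.List.pyRange a b).foldl (fun h r => h.set r.toNat (F (h.getD r.toNat []))) g)[i]? =
      if a ≤ (i : Int) ∧ (i : Int) < b then (g[i]?).map F else g[i]? := by
  have hk : ∀ (k : Nat) (a : Int), 0 ≤ a → (b - a).toNat = k → ∀ (g : List (List Int)) (i : Nat),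
      ((PySem.List.pyRange a b).foldl (fun h r => h.set r.toNat (F (h.getD r.toNat []))) g)[i]? =
        if a ≤ (i : Int) ∧ (i : Int) < b then (g[i]?).map F else g[i]? := by
    intro k
    induction k with
    | zero =>
      intro a ha hk g i
      have hba : b ≤ a := by omega
      rw [PySem.List.pyRange_one_eq_nil hba, List.foldl_nil, if_neg (by omega)]
    | succ k ih =>
      intro a ha hk g i
      have hab : a < b := by omega
      rw [PySem.List.pyRange_one_cons hab, List.foldl_cons]
      rw [ih (a + 1) (by omega) (by omega)]
      rw [List.getElem?_set]
      split_ifs with h1 h2 h3 <;>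
        first
          | rfl
          | (exfalso; omega)
          | (exact (List.getElem?_eq_none (by omega)).symm)
          | (exact List.getElem?_eq_none (by omega))
          | (have hie : a.toNat = i := by omega
             subst hie
             rw [List.getD_eq_getElem?_getD, List.getElem?_eq_getElem (show a.toNat < g.length by omega)]
             rfl)
          | (simp [List.getElem?_eq_none (show g.length ≤ i by omega)])
  intro a ha g i
  exact hk (b - a).toNat a ha rfl g i

-- one row of the horizontal fill, as B paints it
lemma pv_rowH_eq (row : List Int) (m : Nat) (hm : m ≤ row.length)
    (gs lfe rfs ge lc rc : Int) (hgs : 0 ≤ gs) (hrfs : 0 ≤ rfs) (hdisj : lfe < rfs)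
    (hlfe : lfe < (m : Int)) (hge : ge < (m : Int)) :
    pvRowFill (pvRowFill row gs (lfe + 1) lc) rfs (ge + 1) rc =
      (PySem.List.enumerate (row.take m)).map (fun cv => pvPaintH gs lfe rfs ge lc rc cv.1 cv.2)
        ++ row.drop m := by
  apply List.ext_getElem?
  intro i
  rw [pv_rowfill_getElem? rfs (ge + 1) rc hrfs, pv_rowfill_length,
    pv_rowfill_getElem? gs (lfe + 1) lc hgs, List.getElem?_append]
  have hlen : ((PySem.List.enumerate (row.take m)).map
      (fun cv => pvPaintH gs lfe rfs ge lc rc cv.1 cv.2)).length = m := by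
    rw [List.length_map, PySem.List.length_enumerate, List.length_take]
    omega
  rw [hlen]
  by_cases him : i < m
  · rw [if_pos him, List.getElem?_map, PySem.List.getElem?_enumerate, List.getElem?_take,
      if_pos him, List.getElem?_eq_getElem (by omega : i < row.length)]
    simp only [Option.map_some]
    unfold pvPaintH
    split_ifs <;> first | rfl | (exfalso; omega)
  · rw [if_neg him, List.getElem?_drop]
    by_cases hil : i < row.length
    · rw [if_neg (by omega), if_neg (by omega)]
      congr 1
      omega
    · rw [if_neg (by omega), if_neg (by omega)]
      rw [List.getElem?_eq_none (by omega), List.getElem?_eq_none (by omega)]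

-- one row of the vertical fill
lemma pv_rowV_eq (row : List Int) (m : Nat) (hm : m ≤ row.length) (v : Int) :
    pvRowFill row 0 (m : Int) v = List.replicate m v ++ row.drop m := by
  apply List.ext_getElem?
  intro i
  rw [pv_rowfill_getElem? 0 (m : Int) v le_rfl, List.getElem?_append, List.length_replicate]
  by_cases him : i < m
  · rw [if_pos him, if_pos (by omega), List.getElem?_replicate, if_pos him]
  · rw [if_neg him, if_neg (by omega), List.getElem?_drop]
    by_cases hil : i < row.length
    · congr 1; omega
    · rw [List.getElem?_eq_none (by omega), List.getElem?_eq_none (by omega)]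

-- the full horizontal fill
lemma pv_fillH_eq (g : List (List Int)) (m : Nat) (hr : ∀ row ∈ g, m ≤ row.length)
    (gs lfe rfs ge lc rc : Int) (hgs : 0 ≤ gs) (hrfs : 0 ≤ rfs) (hdisj : lfe < rfs)
    (hlfe : lfe < (m : Int)) (hge : ge < (m : Int)) :
    (PySem.List.pyRange 0 (g.length : Int)).foldl (fun h r =>
      pvFillCols (pvFillCols h r gs (lfe + 1) lc) r rfs (ge + 1) rc) g =
    g.map (fun row =>
      (PySem.List.enumerate (row.take m)).map (fun cv => pvPaintH gs lfe rfs ge lc rc cv.1 cv.2)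
        ++ row.drop m) := by
  have hstep : (PySem.List.pyRange 0 (g.length : Int)).foldl (fun h r =>
      pvFillCols (pvFillCols h r gs (lfe + 1) lc) r rfs (ge + 1) rc) g =
      (PySem.List.pyRange 0 (g.length : Int)).foldl (fun h r =>
        h.set r.toNat ((fun row => pvRowFill (pvRowFill row gs (lfe + 1) lc) rfs (ge + 1) rc)
          (h.getD r.toNat []))) g := by
    apply PySem.List.foldl_congr_mem
    intro h r hmem
    have hr0 : 0 ≤ r := (PySem.List.mem_pyRange_one.mp hmem).1
    rw [pv_fillcols_hoist h r gs (lfe + 1) lc hr0]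
    rw [pv_fillcols_hoist _ r rfs (ge + 1) rc hr0]
    rcases lt_or_ge r.toNat h.length with hl | hl
    · have hgd : (h.set r.toNat (pvRowFill (h.getD r.toNat []) gs (lfe + 1) lc)).getD r.toNat [] =
          pvRowFill (h.getD r.toNat []) gs (lfe + 1) lc := by
        rw [List.getD_eq_getElem?_getD, List.getElem?_set, if_pos rfl, if_pos hl]
        rfl
      rw [hgd, List.set_set]
    · rw [List.set_eq_of_length_le hl, List.set_eq_of_length_le hl,
        List.set_eq_of_length_le hl]
  rw [hstep]
  apply List.ext_getElem?
  intro i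
  rw [pv_gridfold_getElem?
    (fun row => pvRowFill (pvRowFill row gs (lfe + 1) lc) rfs (ge + 1) rc)
    ((g.length : Int)) 0 le_rfl, List.getElem?_map]
  by_cases hin : i < g.length
  · rw [if_pos (by omega), List.getElem?_eq_getElem hin]
    simp only [Option.map_some]
    congr 1
    exact pv_rowH_eq g[i] m (hr _ (List.getElem_mem hin)) gs lfe rfs ge lc rc
      hgs hrfs hdisj hlfe hge
  · rw [if_neg (by omega), List.getElem?_eq_none (by omega)]
    rfl

-- the full vertical fill: two disjoint row bands
lemma pv_fillV_eq (g : List (List Int)) (m : Nat) (hr : ∀ row ∈ g, m ≤ row.length)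
    (gs tfe bfs ge tc bc : Int) (hgs : 0 ≤ gs) (hbfs : 0 ≤ bfs) (hdisj : tfe < bfs) :
    (PySem.List.pyRange bfs (ge + 1)).foldl (fun h r => pvFillCols h r 0 (m : Int) bc)
      ((PySem.List.pyRange gs (tfe + 1)).foldl (fun h r => pvFillCols h r 0 (m : Int) tc) g) =
    (PySem.List.enumerate g).map (fun rr =>
      if gs ≤ rr.1 ∧ rr.1 ≤ tfe then List.replicate m tc ++ rr.2.drop m
      else if bfs ≤ rr.1 ∧ rr.1 ≤ ge then List.replicate m bc ++ rr.2.drop m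
      else rr.2) := by
  have hstep : ∀ (v : Int) (a b : Int), 0 ≤ a → ∀ (g' : List (List Int)),
      (PySem.List.pyRange a b).foldl (fun h r => pvFillCols h r 0 (m : Int) v) g' =
      (PySem.List.pyRange a b).foldl (fun h r =>
        h.set r.toNat ((fun row => pvRowFill row 0 (m : Int) v) (h.getD r.toNat []))) g' := by
    intro v a b ha g'
    apply PySem.List.foldl_congr_mem
    intro h r hmem
    exact pv_fillcols_hoist h r 0 (m : Int) v
      (le_trans ha (PySem.List.mem_pyRange_one.mp hmem).1)
  rw [hstep bc bfs (ge + 1) hbfs, hstep tc gs (tfe + 1) hgs]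
  apply List.ext_getElem?
  intro i
  rw [pv_gridfold_getElem? (fun row => pvRowFill row 0 (m : Int) bc) (ge + 1) bfs hbfs,
    pv_gridfold_getElem? (fun row => pvRowFill row 0 (m : Int) tc) (tfe + 1) gs hgs,
    List.getElem?_map, PySem.List.getElem?_enumerate]
  by_cases hin : i < g.length
  · rw [List.getElem?_eq_getElem hin]
    simp only [Option.map_some, zero_add]
    split_ifs <;> (try simp only [Option.map_some]) <;>
      first
        | rfl
        | (exfalso; omega)
        | (congr 1; exact pv_rowV_eq _ m (hr _ (List.getElem_mem hin)) _)
  · rw [List.getElem?_eq_none (l := g) (by omega)]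
    simp only [Option.map_none]
    split_ifs <;> rfl

-- maps over the enumeration agree when the bodies agree on the grid's rows
lemma pv_enum_map_congr {β : Type} (g : List (List Int)) (F F' : Int × List Int → β)
    (h : ∀ (i : Int) (row : List Int), row ∈ g → F (i, row) = F' (i, row)) :
    (PySem.List.enumerate g).map F = (PySem.List.enumerate g).map F' := by
  apply List.ext_getElem?
  intro k
  rw [List.getElem?_map, List.getElem?_map, PySem.List.getElem?_enumerate]
  cases hk : g[k]? with
  | none => rfl
  | some row =>
    have hmem : row ∈ g := List.mem_of_getElem? hk
    simp [h _ row hmem]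

-- at least two distinct non-background colors, from ≥ 3 distinct values overall
lemma pv_two_colors (cells : List Int) (bg : Int)
    (h3 : 3 ≤ (PySem.Set.ofList cells).length) :
    2 ≤ (PySem.Set.ofList (cells.filter (fun v => decide (v ≠ bg)))).length := by
  set S := PySem.Set.ofList cells with hS
  have hnd : S.Nodup := PySem.Set.nodup_ofList cells
  have hsub : (S.filter (fun v => decide (v ≠ bg))) ⊆
      PySem.Set.ofList (cells.filter (fun v => decide (v ≠ bg))) := by
    intro x hx
    rw [List.mem_filter] at hx
    rw [PySem.Set.mem_ofList, List.mem_filter]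
    exact ⟨(PySem.Set.mem_ofList cells x).mp hx.1, hx.2⟩
  have hlen : 2 ≤ (S.filter (fun v => decide (v ≠ bg))).length := by
    have hsplit := List.length_eq_length_filter_add (l := S) (fun v => decide (v ≠ bg))
    have hcnt : (S.filter (fun v => !decide (v ≠ bg))).length ≤ 1 := by
      have : S.filter (fun v => !decide (v ≠ bg)) = S.filter (fun v => v == bg) := by
        apply List.filter_congr
        intro x _
        by_cases hx : x = bg <;> simp [hx]
      rw [this]
      have hc1 : S.count bg ≤ 1 := List.nodup_iff_count_le_one.mp hnd bg
      simpa [List.count_eq_length_filter] using hc1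
    omega
  exact le_trans hlen ((List.subperm_of_subset ((List.Nodup.filter _) hnd) hsub).length_le)

-- ===== VERDICT (by name: the statement is the Claim_ definition above) =====
theorem transform_spec : Claim_equal_transform := by
  unfold Claim_equal_transform
  intro g _ hpre
  obtain ⟨hgne, hm0, hrect, hcard⟩ := hpre
  unfold Spec_transform
  simp only [transform, transform_alt]
  set m := g.headI.length with hm
  have hrlen : ∀ row ∈ g, m ≤ row.length := fun row hr => (hrect row hr).ge
  have hcols : PySem.List.len (PySem.List.pyGetD g 0 []) = ((m : Nat) : Int) := by
    rw [pv_get_zero, PySem.List.len_eq]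
  rw [hcols]
  rw [PySem.List.len_eq g]
  rw [pv_cells_eq g m hrlen]
  have hTake : g.flatMap (fun row => row.take m) = g.flatMap (fun row => row) := by
    apply List.flatMap_congr
    intro row hr
    exact List.take_of_length_le (hrect row hr).le
  rw [hTake]
  set cells := g.flatMap (fun row => row) with hcells
  simp only [PySem.Dict.foldl_insert_getD_add_one_eq_counter]
  rw [← pv_bg_eq cells]
  set bg := pvMostCommon1 cells with hbgdef
  rw [pv_nested_fold_eq g g.length m (pvBBStep bg) PySem.Dict.empty]
  have hA : (fun (d : PySem.Dict Int (Int × Int × Int × Int)) (q : (Int × Int) × Int) =>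
      pvBBStep bg d q.1.1 q.1.2 q.2) = fun d q => if q.2 ≠ bg then pvIns d q else d := by
    funext d q
    exact pv_bbstep_eq bg d q
  rw [hA, PySem.List.foldl_ite_eq_foldl_filter]
  set ps := List.filter (fun q => decide (q.2 ≠ bg)) (pvPts g g.length m) with hps
  set dA := ps.foldl pvIns PySem.Dict.empty with hdA
  rw [show dA.keys = PySem.Set.ofList (ps.map (fun q => q.2)) from by
    rw [hdA]; exact pv_keysA ps]
  set kl := PySem.Set.ofList (ps.map (fun q => q.2)) with hkl
  have hmaps : ps.map (fun q => q.2) = cells.filter (fun v => decide (v ≠ bg)) := by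
    rw [hps]
    rw [show (List.filter (fun q => decide (q.2 ≠ bg)) (pvPts g g.length m)) =
      List.filter ((fun v => decide (v ≠ bg)) ∘ (fun (q : (Int × Int) × Int) => q.2))
        (pvPts g g.length m) from rfl]
    rw [← List.filter_map, pv_pts_map_snd g m hrlen, hTake]
  have hkl2 : 2 ≤ kl.length := by
    rw [hkl, hmaps]
    exact pv_two_colors _ bg hcard
  have h0 : 0 < kl.length := by omega
  have h1 : 1 < kl.length := by omega
  rw [pv_pair_spec bg cells, ← hmaps, ← hkl]
  have hc1 : PySem.List.pyGetD (kl.take 2) 0 0 = kl[0] := by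
    have hz : (0 : Int) = ((0 : Nat) : Int) := rfl
    rw [hz, PySem.List.pyGetD_natCast, List.getD_eq_getElem?_getD, List.getElem?_take,
      if_pos (by omega), List.getElem?_eq_getElem h0]
    rfl
  have hc2 : PySem.List.pyGetD (kl.take 2) 1 0 = kl[1] := by
    have hz : (1 : Int) = ((1 : Nat) : Int) := rfl
    rw [hz, PySem.List.pyGetD_natCast, List.getD_eq_getElem?_getD, List.getElem?_take,
      if_pos (by omega), List.getElem?_eq_getElem h1]
    rfl
  have hc1' : PySem.List.pyGetD kl 0 0 = kl[0] := by
    have hz : (0 : Int) = ((0 : Nat) : Int) := rfl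
    rw [hz, PySem.List.pyGetD_natCast, List.getD_eq_getElem?_getD,
      List.getElem?_eq_getElem h0]
    rfl
  have hc2' : PySem.List.pyGetD kl 1 0 = kl[1] := by
    have hz : (1 : Int) = ((1 : Nat) : Int) := rfl
    rw [hz, PySem.List.pyGetD_natCast, List.getD_eq_getElem?_getD,
      List.getElem?_eq_getElem h1]
    rfl
  rw [hc1, hc2, hc1', hc2']
  -- the two colors are non-background members of the color list
  have hklmem : ∀ y ∈ kl, y ∈ ps.map (fun q => q.2) := by
    intro y hy
    rw [hkl, PySem.Set.mem_ofList] at hy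
    exact hy
  have hbg1 : kl[0] ≠ bg := by
    rcases List.mem_map.mp (hklmem _ (List.getElem_mem h0)) with ⟨q, hq, he⟩
    have := List.of_mem_filter (p := fun (q : (Int × Int) × Int) => decide (q.2 ≠ bg)) (by rw [hps] at hq; exact hq)
    simp only [decide_eq_true_eq] at this
    exact he ▸ this
  have hbg2 : kl[1] ≠ bg := by
    rcases List.mem_map.mp (hklmem _ (List.getElem_mem h1)) with ⟨q, hq, he⟩
    have := List.of_mem_filter (p := fun (q : (Int × Int) × Int) => decide (q.2 ≠ bg)) (by rw [hps] at hq; exact hq)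
    simp only [decide_eq_true_eq] at this
    exact he ▸ this
  -- per-color cell lists
  set qs1 := (pvPts g g.length m).filter (fun q => q.2 == kl[0]) with hqs1
  set qs2 := (pvPts g g.length m).filter (fun q => q.2 == kl[1]) with hqs2
  have hfil1 : ps.filter (fun q => q.2 == kl[0]) = qs1 := by
    rw [hps, hqs1]; exact pv_filter_ps _ bg kl[0] hbg1
  have hfil2 : ps.filter (fun q => q.2 == kl[1]) = qs2 := by
    rw [hps, hqs2]; exact pv_filter_ps _ bg kl[1] hbg2
  have hne1 : qs1 ≠ [] := by
    rcases List.mem_map.mp (hklmem _ (List.getElem_mem h0)) with ⟨q, hq, he⟩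
    rw [← hfil1]
    exact List.ne_nil_of_mem (a := q) (List.mem_filter.mpr ⟨hq, by simp [he]⟩)
  have hne2 : qs2 ≠ [] := by
    rcases List.mem_map.mp (hklmem _ (List.getElem_mem h1)) with ⟨q, hq, he⟩
    rw [← hfil2]
    exact List.ne_nil_of_mem (a := q) (List.mem_filter.mpr ⟨hq, by simp [he]⟩)
  rw [show dA.getD kl[0] (0, 0, 0, 0) = pvBBox (qs1.map (fun q => q.1)) from by
    rw [hdA, ← hfil1]
    exact pv_dictA_getD ps kl[0] (by rw [hfil1]; exact hne1)]
  rw [show dA.getD kl[1] (0, 0, 0, 0) = pvBBox (qs2.map (fun q => q.1)) from by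
    rw [hdA, ← hfil2]
    exact pv_dictA_getD ps kl[1] (by rw [hfil2]; exact hne2)]
  rw [pv_colsOf_pts g m hrect kl[0], pv_colsOf_pts g m hrect kl[1],
    pv_rowsOf_pts g m hrect kl[0], pv_rowsOf_pts g m hrect kl[1], ← hqs1, ← hqs2]
  -- A's bbox fields are B's min/max of the coordinate lists
  have hmm : ∀ l : List ((Int × Int) × Int),
      pvBBox (l.map (fun q => q.1)) =
        (pvMinI (l.map (fun q => q.1.1)), pvMaxI (l.map (fun q => q.1.1)),
         pvMinI (l.map (fun q => q.1.2)), pvMaxI (l.map (fun q => q.1.2))) := by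
    intro l
    unfold pvBBox
    rw [List.map_map, List.map_map]
    rfl
  rw [hmm qs1, hmm qs2]
  simp only []
  -- bounds of every extent, for the fill lemmas
  have hbnd : ∀ (qs : List ((Int × Int) × Int)), qs ≠ [] →
      qs = (pvPts g g.length m).filter (fun q => q.2 == kl[0]) ∨
      qs = (pvPts g g.length m).filter (fun q => q.2 == kl[1]) →
      (0 ≤ pvMinI (qs.map (fun q => q.1.1)) ∧ pvMinI (qs.map (fun q => q.1.1)) < (g.length : Int)) ∧
      (0 ≤ pvMaxI (qs.map (fun q => q.1.1)) ∧ pvMaxI (qs.map (fun q => q.1.1)) < (g.length : Int)) ∧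
      (0 ≤ pvMinI (qs.map (fun q => q.1.2)) ∧ pvMinI (qs.map (fun q => q.1.2)) < (m : Int)) ∧
      (0 ≤ pvMaxI (qs.map (fun q => q.1.2)) ∧ pvMaxI (qs.map (fun q => q.1.2)) < (m : Int)) := by
    intro qs hne hqs
    have hq : ∀ q ∈ qs, q ∈ pvPts g g.length m := by
      intro q hqmem
      rcases hqs with h | h <;> (rw [h] at hqmem; exact List.mem_of_mem_filter hqmem)
    have hb : ∀ x ∈ qs.map (fun q => q.1.1), 0 ≤ x ∧ x < (g.length : Int) := by
      intro x hx
      rcases List.mem_map.mp hx with ⟨q, hqm, rfl⟩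
      have := pv_pts_bounds g g.length m q (hq q hqm)
      exact ⟨this.1, this.2.1⟩
    have hb2 : ∀ x ∈ qs.map (fun q => q.1.2), 0 ≤ x ∧ x < (m : Int) := by
      intro x hx
      rcases List.mem_map.mp hx with ⟨q, hqm, rfl⟩
      have := pv_pts_bounds g g.length m q (hq q hqm)
      exact ⟨this.2.2.1, this.2.2.2⟩
    have hne1' : qs.map (fun q => (q.1.1 : Int)) ≠ [] := by simpa using hne
    have hne2' : qs.map (fun q => (q.1.2 : Int)) ≠ [] := by simpa using hne
    exact ⟨hb _ (pv_minI_mem _ hne1'), hb _ (pv_maxI_mem _ hne1'),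
      hb2 _ (pv_minI_mem _ hne2'), hb2 _ (pv_maxI_mem _ hne2')⟩
  have hb1 := hbnd qs1 hne1 (Or.inl hqs1)
  have hb2 := hbnd qs2 hne2 (Or.inr hqs2)
  set r1lo := pvMinI (qs1.map (fun q => q.1.1))
  set r1hi := pvMaxI (qs1.map (fun q => q.1.1))
  set c1lo := pvMinI (qs1.map (fun q => q.1.2))
  set c1hi := pvMaxI (qs1.map (fun q => q.1.2))
  set r2lo := pvMinI (qs2.map (fun q => q.1.1))
  set r2hi := pvMaxI (qs2.map (fun q => q.1.1))
  set c2lo := pvMinI (qs2.map (fun q => q.1.2))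
  set c2hi := pvMaxI (qs2.map (fun q => q.1.2))
  have hd0 : ∀ row ∈ g, row.drop m = [] := fun row hr =>
    List.drop_eq_nil_of_le (hrect row hr).le
  by_cases hH : c1hi < c2lo ∨ c2hi < c1lo
  · rw [if_pos hH, if_pos hH]
    by_cases hLR : c1lo < c2lo
    · rw [if_pos hLR, if_pos hLR]
      simp only []
      have hd1 := PySem.Int.floordiv_mul_add_mod (c2lo - 1 - (c1hi + 1) + 1) 2
      have hn1 := PySem.Int.mod_nonneg (a := c2lo - 1 - (c1hi + 1) + 1) (b := 2) (by norm_num)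
      have hl1 := PySem.Int.mod_lt (a := c2lo - 1 - (c1hi + 1) + 1) (b := 2) (by norm_num)
      refine (pv_fillH_eq g m hrlen _ _ _ _ kl[0] kl[1] ?_ ?_ ?_ ?_ ?_).trans ?_
      · omega
      · split_ifs <;> omega
      · split_ifs <;> omega
      · omega
      · omega
      · apply List.map_congr_left
        intro row hrw
        rw [List.take_of_length_le (hrect row hrw).le, hd0 row hrw, List.append_nil]
        simp only [pvPaintH]
    · rw [if_neg hLR, if_neg hLR]
      simp only []
      have hd1 := PySem.Int.floordiv_mul_add_mod (c1lo - 1 - (c2hi + 1) + 1) 2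
      have hn1 := PySem.Int.mod_nonneg (a := c1lo - 1 - (c2hi + 1) + 1) (b := 2) (by norm_num)
      have hl1 := PySem.Int.mod_lt (a := c1lo - 1 - (c2hi + 1) + 1) (b := 2) (by norm_num)
      refine (pv_fillH_eq g m hrlen _ _ _ _ kl[1] kl[0] ?_ ?_ ?_ ?_ ?_).trans ?_
      · omega
      · split_ifs <;> omega
      · split_ifs <;> omega
      · omega
      · omega
      · apply List.map_congr_left
        intro row hrw
        rw [List.take_of_length_le (hrect row hrw).le, hd0 row hrw, List.append_nil]
        simp only [pvPaintH]
  · rw [if_neg hH, if_neg hH]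
    by_cases hTB : r1lo < r2lo
    · rw [if_pos hTB, if_pos hTB]
      simp only []
      have hd1 := PySem.Int.floordiv_mul_add_mod (r2lo - 1 - (r1hi + 1) + 1) 2
      have hn1 := PySem.Int.mod_nonneg (a := r2lo - 1 - (r1hi + 1) + 1) (b := 2) (by norm_num)
      have hl1 := PySem.Int.mod_lt (a := r2lo - 1 - (r1hi + 1) + 1) (b := 2) (by norm_num)
      refine (pv_fillV_eq g m hrlen _ _ _ _ kl[0] kl[1] ?_ ?_ ?_).trans ?_
      · omega
      · split_ifs <;> omega
      · split_ifs <;> omega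
      · simp only [PySem.List.pyRepeat_singleton,
          show ((m : Nat) : Int).toNat = m from by omega]
        apply pv_enum_map_congr
        intro i row hrw
        rw [hd0 row hrw, List.append_nil, List.append_nil]
    · rw [if_neg hTB, if_neg hTB]
      simp only []
      have hd1 := PySem.Int.floordiv_mul_add_mod (r1lo - 1 - (r2hi + 1) + 1) 2
      have hn1 := PySem.Int.mod_nonneg (a := r1lo - 1 - (r2hi + 1) + 1) (b := 2) (by norm_num)
      have hl1 := PySem.Int.mod_lt (a := r1lo - 1 - (r2hi + 1) + 1) (b := 2) (by norm_num)
      refine (pv_fillV_eq g m hrlen _ _ _ _ kl[1] kl[0] ?_ ?_ ?_).trans ?_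
      · omega
      · split_ifs <;> omega
      · split_ifs <;> omega
      · simp only [PySem.List.pyRepeat_singleton,
          show ((m : Nat) : Int).toNat = m from by omega]
        apply pv_enum_map_congr
        intro i row hrw
        rw [hd0 row hrw, List.append_nil, List.append_nil]
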